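-- pv_equiv track=rewrite | github.com/AbhayPatil04/PythonProjects | kaprekars_challenge.py | KepsConstant
-- ===== SOURCE A (Python) =====
-- def Ascend(arrange):
--     asc = []
--     i = 0
--     arrange.sort()
--     while i < len(arrange):
--         asc.append(arrange[i])
--         i += 1
--
-- def Decend(arrange):
--     dec = []
--     i = 0
--     arrange.sort(reverse=1)
--     while i < len(arrange):
--         dec.append(arrange[i])
--         i += 1
--
-- def KepsConstant(number):
--     number = str(number)
--     tron = number
--     arrange = []
--     i = 0
--     while i < len(number):
--         arrange.append(int(number[i]))
--         i += 1
--
--     if len(arrange) < 4: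
--         while len(arrange) < 4:
--             arrange.insert(0, int(0))
--
--     A = ''
--     Ascend(arrange)
--     while len(A) < 4:
--         A += str(arrange[len(A)])
--     D = ''
--     Decend(arrange)
--     while len(D) < 4:
--         D += str(arrange[len(D)])
--
--     x = 0
--     ctr = 0
--     pog = []
--     while int(number) != 6174:
--         if int(number) == 0:
--             break
--         if int(A) > int(D):
--             number = str(int(A) - int(D))
--             if int(number) != 6174 and int(number) != 0:
--                 pog.append(f'{number} >')
--             else:
--                 pog.append(f'{number}')
--         else:
--             number = str(int(D) - int(A))
--             if int(number) != 6174 and int(number) != 0: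
--                 pog.append(f'{number} >')
--             else:
--                 pog.append(f'{number}')
--         arrange = []
--         while x < len(number):
--             arrange.append(int(number[x]))
--             x += 1
--
--         if len(arrange) < 4:
--             while len(arrange) < 4:
--                 arrange.insert(0, int(0))
--
--         A = ''
--         Ascend(arrange)
--         while len(A) < 4:
--             A += str(arrange[len(A)])
--         D = ''
--         Decend(arrange)
--         while len(D) < 4:
--             D += str(arrange[len(D)])
--         x = 0
--         ctr += 1
--     return ctr
-- ===== SOURCE B (Python) =====
-- def _next(n):
--     ds = sorted(int(c) for c in str(n))
--     if len(ds) < 4: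
--         ds = [0] * (4 - len(ds)) + ds
--     asc = int(''.join(map(str, ds[:4])))
--     desc = int(''.join(map(str, sorted(ds, reverse=True)[:4])))
--     return desc - asc
--
--
-- def KepsConstant(number):
--     if number == 6174 or number == 0:
--         return 0
--     return 1 + KepsConstant(_next(number))
-- ===== Notes on version B (the rewrite author's own statement) =====
-- stated objective: simpler
-- what changed: A's single while-loop with a step counter, duplicated digit/pad/sort/string-build blocks, index-walking inner loops and dead bookkeeping lists is replaced by a recursive step-counter over one small next-Kaprekar-step helper built from sorted/slice/join, returning zero at the two fixed points and one plus the recursive count otherwise.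
import Mathlib
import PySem

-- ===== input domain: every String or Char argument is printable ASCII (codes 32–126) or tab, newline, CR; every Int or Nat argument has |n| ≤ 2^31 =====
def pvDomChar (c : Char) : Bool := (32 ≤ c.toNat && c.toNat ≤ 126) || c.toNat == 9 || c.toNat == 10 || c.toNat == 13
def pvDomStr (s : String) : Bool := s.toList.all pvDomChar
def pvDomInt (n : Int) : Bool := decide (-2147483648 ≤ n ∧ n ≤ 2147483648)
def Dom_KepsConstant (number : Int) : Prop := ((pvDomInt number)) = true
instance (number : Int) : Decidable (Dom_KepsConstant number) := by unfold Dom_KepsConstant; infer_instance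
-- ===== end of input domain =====

-- B replaces A's while-loop with its inflated string state by a recursive step-counter over a
-- single `nextK` Kaprekar step built from sort/take/pad list primitives; same return value.

-- ===== PORT A =====
-- termination helper for buildStr/padLoop: str(n) is never empty
theorem pv_toChars_length_pos (n : Int) : 0 < (PySem.Int.toChars n).length := by
  unfold PySem.Int.toChars
  split
  · simp
  · exact Nat.length_toDigits_pos

-- def Ascend(arrange): sorts `arrange` in place (ascending); the local copy `asc` it builds is dead
def Ascend (arrange : List Int) : List Int :=
  let arr := PySem.List.sorted arrange (fun x => x) false
  let _asc := (PySem.List.pyRange 0 (PySem.List.len arr) 1).foldl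
    (fun asc i => asc ++ [PySem.List.pyGetD arr i 0]) ([] : List Int)
  arr

-- def Decend(arrange): sorts in place with reverse=1; local copy `dec` is dead
def Decend (arrange : List Int) : List Int :=
  let arr := PySem.List.sorted arrange (fun x => x) true
  let _dec := (PySem.List.pyRange 0 (PySem.List.len arr) 1).foldl
    (fun dec i => dec ++ [PySem.List.pyGetD arr i 0]) ([] : List Int)
  arr

-- Python's `number` variable always holds str(m) of an int m; we carry m itself:
-- int(number) is m, number[i] is (toChars m)[i], len(number) is (toChars m).length — exact.
-- `while i < len(number): arrange.append(int(number[i]))` (this block appears twice in A, with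
-- loop variable i resp. x, both starting at 0)
def parseDigits (number : Int) : List Int :=
  (PySem.List.pyRange 0 (PySem.List.len (PySem.Int.toChars number)) 1).foldl
    (fun arrange i => arrange ++ [(PySem.Int.ofChars? [PySem.List.pyGetD (PySem.Int.toChars number) i ' ']).getD 0])
    ([] : List Int)

-- `while len(arrange) < 4: arrange.insert(0, int(0))`
def padLoop (arrange : List Int) : List Int :=
  if arrange.length < 4 then padLoop ((0 : Int) :: arrange) else arrange
termination_by 4 - arrange.length

-- `while len(A) < 4: A += str(arrange[len(A)])`
def buildStr (arrange : List Int) (A : List Char) : List Char :=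
  if A.length < 4 then
    buildStr arrange (A ++ PySem.Int.toChars (PySem.List.pyGetD arrange ((A.length : Int)) 0))
  else A
termination_by 4 - A.length
decreasing_by
  have := pv_toChars_length_pos (PySem.List.pyGetD arrange ((A.length : Int)) 0)
  simp only [List.length_append]
  omega

-- the digits→pad→Ascend→A→Decend→D block, duplicated verbatim in A (before the loop and at the
-- end of each iteration)
def stepAD (m : Int) : List Char × List Char :=
  let arrange := parseDigits m
  let arrange := if arrange.length < 4 then padLoop arrange else arrange
  let arrange := Ascend arrange
  let A := buildStr arrange []
  let arrange := Decend arrange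
  let D := buildStr arrange []
  (A, D)

-- `while int(number) != 6174: if int(number) == 0: break; ...` — fuel only makes the recursion
-- structural; 64 iterations are never exhausted on the allowed inputs
def kepsLoop (fuel : Nat) (m : Int) (A D : List Char) (ctr : Int) (pog : List (List Char)) : Int :=
  if m ≠ 6174 then
    if m = 0 then ctr
    else
      match fuel with
      | 0 => ctr
      | fuel + 1 =>
        let aN := (PySem.Int.ofChars? A).getD 0
        let dN := (PySem.Int.ofChars? D).getD 0
        let m' := if aN > dN then aN - dN else dN - aN
        let pog' := pog ++ [if m' ≠ 6174 ∧ m' ≠ 0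
          then PySem.Int.toChars m' ++ [' ', '>'] else PySem.Int.toChars m']
        let AD := stepAD m'
        kepsLoop fuel m' AD.1 AD.2 (ctr + 1) pog'
  else ctr

def KepsConstant (number : Int) : Int :=
  let _tron := number
  let AD := stepAD number
  kepsLoop 64 number AD.1 AD.2 0 []

-- ===== PORT B =====
-- def _next(n): one Kaprekar step
def nextK (n : Int) : Int :=
  let ds := PySem.List.sorted ((PySem.Int.toChars n).map
    (fun c => (PySem.Int.ofChars? [c]).getD 0)) (fun x => x) false
  let ds := if ds.length < 4 then List.replicate (4 - ds.length) (0 : Int) ++ ds else ds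
  let asc := (PySem.Int.ofChars? ((ds.take 4).flatMap PySem.Int.toChars)).getD 0
  let desc := (PySem.Int.ofChars?
    (((PySem.List.sorted ds (fun x => x) true).take 4).flatMap PySem.Int.toChars)).getD 0
  desc - asc

-- fuel only makes the recursion structural; never exhausted on allowed inputs
def altGo (fuel : Nat) (n : Int) : Int :=
  if n = 6174 ∨ n = 0 then 0
  else
    match fuel with
    | 0 => 0
    | fuel + 1 => 1 + altGo fuel (nextK n)

def KepsConstant_alt (number : Int) : Int := altGo 64 number

-- ===== PRECONDITION & SPEC =====
-- A raises ValueError on negative inputs (int('-') while collecting digits); B raises there too.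
def Pre_KepsConstant (number : Int) : Prop := 0 ≤ number
instance (number : Int) : Decidable (Pre_KepsConstant number) := by unfold Pre_KepsConstant; infer_instance
def pvWitness_KepsConstant : Int := 1234

def Spec_KepsConstant (number : Int) (out : Int) : Prop := out = KepsConstant_alt number
instance (number : Int) (out : Int) : Decidable (Spec_KepsConstant number out) := by unfold Spec_KepsConstant; infer_instance

-- ===== CLAIM (what is proved, stated in full; the proofs are below) =====
def Claim_equal_KepsConstant : Prop := ∀ (number : Int), Dom_KepsConstant number → Pre_KepsConstant number → Spec_KepsConstant number (KepsConstant number)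

-- ===== LEMMAS AND PROOFS =====
def chDig (c : Char) : Int := (PySem.Int.ofChars? [c]).getD 0
def dChar (d : Int) : Char := Char.ofNat (48 + d.toNat)
def digitsOf (m : Int) : List Int := (PySem.Int.toChars m).map chDig

theorem chDig_digit (c : Char) (h : c.isDigit = true) :
    0 ≤ chDig c ∧ chDig c ≤ 9 ∧ PySem.Int.toChars (chDig c) = [c] ∧ dChar (chDig c) = c := by
  simp [Char.isDigit] at h
  obtain ⟨h1, h2⟩ := h
  have h1' : 48 ≤ c.toNat := UInt32.le_iff_toNat_le.mp h1
  have h2' : c.toNat ≤ 57 := UInt32.le_iff_toNat_le.mp h2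
  have hc : c = Char.ofNat c.toNat := (Char.ofNat_toNat c).symm
  interval_cases h48 : c.toNat <;> rw [hc] <;> decide

theorem toChars_digits (m : Int) (hm : 0 ≤ m) :
    ∀ c ∈ PySem.Int.toChars m, c.isDigit = true := by
  intro c hc
  unfold PySem.Int.toChars at hc
  rw [if_neg (by omega)] at hc
  exact Nat.isDigit_of_mem_toDigits (by norm_num) (by norm_num) hc

theorem toChars_digit (d : Int) (h0 : 0 ≤ d) (h9 : d ≤ 9) :
    PySem.Int.toChars d = [dChar d] := by
  interval_cases d <;> decide

theorem parseDigits_eq (m : Int) : parseDigits m = digitsOf m := by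
  unfold parseDigits digitsOf
  rw [PySem.List.foldl_append_singleton_eq_map]
  have h := PySem.List.map_pyGetD_pyRange_zero (PySem.Int.toChars m) ' '
  calc ([] : List Int) ++ ((PySem.List.pyRange 0 (PySem.List.len (PySem.Int.toChars m)) 1).map
        (fun i => (PySem.Int.ofChars? [PySem.List.pyGetD (PySem.Int.toChars m) i ' ']).getD 0))
      = ((PySem.List.pyRange 0 (PySem.List.len (PySem.Int.toChars m)) 1).map
        (fun i => PySem.List.pyGetD (PySem.Int.toChars m) i ' ')).map chDig := by
        simp only [List.map_map, List.nil_append]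
        rfl
    _ = (PySem.Int.toChars m).map chDig := by rw [h]

theorem padLoop_eq (l : List Int) : padLoop l = List.replicate (4 - l.length) 0 ++ l := by
  fun_induction padLoop l with
  | case1 l h ih =>
      rw [ih]
      have : 4 - l.length = (4 - ((0 :: l).length)) + 1 := by simp; omega
      rw [this, List.replicate_succ']
      simp
  | case2 l h =>
      have h0 : 4 - l.length = 0 := by omega
      simp [h0]

theorem build4 (a b c d : Int) (t : List Int)
    (ha : 0 ≤ a ∧ a ≤ 9) (hb : 0 ≤ b ∧ b ≤ 9) (hc : 0 ≤ c ∧ c ≤ 9) (hd : 0 ≤ d ∧ d ≤ 9) :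
    buildStr (a :: b :: c :: d :: t) [] = [dChar a, dChar b, dChar c, dChar d] := by
  rw [buildStr, if_pos (by simp), PySem.List.pyGetD_natCast]
  simp [toChars_digit a ha.1 ha.2, List.getD]
  rw [buildStr, if_pos (by simp), PySem.List.pyGetD_natCast]
  simp [toChars_digit b hb.1 hb.2, List.getD]
  rw [buildStr, if_pos (by simp), PySem.List.pyGetD_natCast]
  simp [toChars_digit c hc.1 hc.2, List.getD]
  rw [buildStr, if_pos (by simp), PySem.List.pyGetD_natCast]
  simp [toChars_digit d hd.1 hd.2, List.getD]
  rw [buildStr]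
  simp

-- int() of a four-digit string, digit by digit (finite check over all 10^4 digit quadruples)
set_option maxHeartbeats 2000000 in
theorem ofChars_four_nat : ∀ k0 < 10, ∀ k1 < 10, ∀ k2 < 10, ∀ k3 < 10,
    PySem.Int.ofChars? [Char.ofNat (48+k0), Char.ofNat (48+k1), Char.ofNat (48+k2), Char.ofNat (48+k3)]
      = some (1000*(k0:Int)+100*k1+10*k2+k3) := by decide

theorem ofChars_four (d0 d1 d2 d3 : Int)
    (h0 : 0 ≤ d0 ∧ d0 ≤ 9) (h1 : 0 ≤ d1 ∧ d1 ≤ 9) (h2 : 0 ≤ d2 ∧ d2 ≤ 9) (h3 : 0 ≤ d3 ∧ d3 ≤ 9) :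
    PySem.Int.ofChars? [dChar d0, dChar d1, dChar d2, dChar d3]
      = some (1000*d0+100*d1+10*d2+d3) := by
  obtain ⟨k0, rfl⟩ : ∃ k : Nat, d0 = (k : Int) := ⟨d0.toNat, by omega⟩
  obtain ⟨k1, rfl⟩ : ∃ k : Nat, d1 = (k : Int) := ⟨d1.toNat, by omega⟩
  obtain ⟨k2, rfl⟩ : ∃ k : Nat, d2 = (k : Int) := ⟨d2.toNat, by omega⟩
  obtain ⟨k3, rfl⟩ : ∃ k : Nat, d3 = (k : Int) := ⟨d3.toNat, by omega⟩
  have := ofChars_four_nat k0 (by omega) k1 (by omega) k2 (by omega) k3 (by omega)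
  simpa [dChar] using this

theorem digitsOf_bounds (m : Int) (hm : 0 ≤ m) : ∀ x ∈ digitsOf m, 0 ≤ x ∧ x ≤ 9 := by
  intro x hx
  unfold digitsOf at hx
  obtain ⟨c, hc, rfl⟩ := List.mem_map.mp hx
  obtain ⟨b1, b2, -, -⟩ := chDig_digit c (toChars_digits m hm c hc)
  exact ⟨b1, b2⟩

theorem padIf_eq (l : List Int) :
    (if l.length < 4 then padLoop l else l) = List.replicate (4 - l.length) 0 ++ l := by
  split
  · exact padLoop_eq l
  · rename_i h
    have h0 : 4 - l.length = 0 := by omega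
    simp [h0]

def sA (m : Int) : List Int :=
  PySem.List.sorted (List.replicate (4 - (digitsOf m).length) 0 ++ digitsOf m) (fun x => x) false
def sD (m : Int) : List Int := PySem.List.sorted (sA m) (fun x => x) true

theorem stepAD_eq (m : Int) : stepAD m = (buildStr (sA m) [], buildStr (sD m) []) := by
  simp only [stepAD, Ascend, Decend, parseDigits_eq, padIf_eq, sA, sD]

theorem sA_len (m : Int) : 4 ≤ (sA m).length := by
  unfold sA
  rw [PySem.List.length_sorted]
  have := pv_toChars_length_pos m
  simp [digitsOf]
  omega

theorem sA_mem_bounds (m : Int) (hm : 0 ≤ m) : ∀ x ∈ sA m, 0 ≤ x ∧ x ≤ 9 := by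
  intro x hx
  have hp := (PySem.List.sorted_perm (List.replicate (4 - (digitsOf m).length) 0 ++ digitsOf m) (fun x => x) false).mem_iff.mp hx
  rcases List.mem_append.mp hp with h | h
  · have := List.eq_of_mem_replicate h
    omega
  · exact digitsOf_bounds m hm x h

theorem four_decomp (l : List Int) (h : 4 ≤ l.length) : ∃ a b c d t, l = a::b::c::d::t := by
  match l, h with
  | a::b::c::d::t, _ => exact ⟨a, b, c, d, t, rfl⟩

theorem step_core (m : Int) (hm : 0 ≤ m) :
    ∃ aN dN : Int,
      (PySem.Int.ofChars? (stepAD m).1).getD 0 = aN ∧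
      (PySem.Int.ofChars? (stepAD m).2).getD 0 = dN ∧
      aN ≤ dN ∧ nextK m = dN - aN := by
  obtain ⟨a0, a1, a2, a3, ta, hA⟩ := four_decomp (sA m) (sA_len m)
  have hDlen : 4 ≤ (sD m).length := by
    unfold sD; rw [PySem.List.length_sorted]; exact sA_len m
  obtain ⟨d0, d1, d2, d3, td, hD⟩ := four_decomp (sD m) hDlen
  have memA : ∀ x ∈ sA m, 0 ≤ x ∧ x ≤ 9 := sA_mem_bounds m hm
  have memD : ∀ x ∈ sD m, x ∈ sA m := fun x hx =>
    (PySem.List.sorted_perm (sA m) (fun x => x) true).mem_iff.mp hx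
  have ha0 := memA a0 (by rw [hA]; simp)
  have ha1 := memA a1 (by rw [hA]; simp)
  have ha2 := memA a2 (by rw [hA]; simp)
  have ha3 := memA a3 (by rw [hA]; simp)
  have hd0m : d0 ∈ sA m := memD d0 (by rw [hD]; simp)
  have hd1m : d1 ∈ sA m := memD d1 (by rw [hD]; simp)
  have hd2m : d2 ∈ sA m := memD d2 (by rw [hD]; simp)
  have hd3m : d3 ∈ sA m := memD d3 (by rw [hD]; simp)
  have hd0 := memA d0 hd0m
  have hd1 := memA d1 hd1m
  have hd2 := memA d2 hd2m
  have hd3 := memA d3 hd3m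
  -- head of the ascending sort is minimal, head of the descending sort is maximal
  have hmin : ∀ y ∈ sA m, a0 ≤ y := by
    intro y hy
    have := PySem.List.key_head_sorted_le
      (List.replicate (4 - (digitsOf m).length) 0 ++ digitsOf m) (fun x => x) hA
    exact this y ((PySem.List.sorted_perm _ (fun x => x) false).mem_iff.mp hy)
  have hmax : ∀ y ∈ sA m, y ≤ d0 := PySem.List.key_head_sorted_rev_ge (sA m) (fun x => x) hD
  -- the two 4-char strings and their int() values
  have hSA : buildStr (sA m) [] = [dChar a0, dChar a1, dChar a2, dChar a3] := by
    rw [hA]; exact build4 _ _ _ _ _ ha0 ha1 ha2 ha3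
  have hSD : buildStr (sD m) [] = [dChar d0, dChar d1, dChar d2, dChar d3] := by
    rw [hD]; exact build4 _ _ _ _ _ hd0 hd1 hd2 hd3
  have hvA := ofChars_four a0 a1 a2 a3 ha0 ha1 ha2 ha3
  have hvD := ofChars_four d0 d1 d2 d3 hd0 hd1 hd2 hd3
  refine ⟨1000*a0+100*a1+10*a2+a3, 1000*d0+100*d1+10*d2+d3, ?_, ?_, ?_, ?_⟩
  · rw [stepAD_eq]; simp [hSA, hvA]
  · rw [stepAD_eq]; simp [hSD, hvD]
  · -- aN ≤ dN
    have h00 : a0 ≤ d0 := hmax a0 (by rw [hA]; simp)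
    rcases lt_or_eq_of_le h00 with hlt | heq
    · omega
    · have e : ∀ y ∈ sA m, y = a0 := fun y hy => le_antisymm (heq ▸ hmax y hy) (hmin y hy)
      have := e a1 (by rw [hA]; simp)
      have := e a2 (by rw [hA]; simp)
      have := e a3 (by rw [hA]; simp)
      have := e d1 hd1m
      have := e d2 hd2m
      have := e d3 hd3m
      omega
  · -- B's step computes the same difference
    have hds : ((PySem.Int.toChars m).map (fun c => (PySem.Int.ofChars? [c]).getD 0)) = digitsOf m := rfl
    have hL : (PySem.List.sorted (digitsOf m) (fun x => x) false).length = (digitsOf m).length :=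
      PySem.List.length_sorted _ _ _
    have hpadB : (if (PySem.List.sorted (digitsOf m) (fun x => x) false).length < 4
        then List.replicate (4 - (PySem.List.sorted (digitsOf m) (fun x => x) false).length) (0:Int) ++
          PySem.List.sorted (digitsOf m) (fun x => x) false
        else PySem.List.sorted (digitsOf m) (fun x => x) false) = sA m := by
      have hper : (List.replicate (4 - (digitsOf m).length) (0:Int) ++
          PySem.List.sorted (digitsOf m) (fun x => x) false).Perm
          (List.replicate (4 - (digitsOf m).length) 0 ++ digitsOf m) :=
        List.Perm.append_left _ (PySem.List.sorted_perm _ _ _)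
      have hpw : List.Pairwise (fun x y => x ≤ y)
          (List.replicate (4 - (digitsOf m).length) (0:Int) ++
            PySem.List.sorted (digitsOf m) (fun x => x) false) := by
        rw [List.pairwise_append]
        refine ⟨List.pairwise_replicate.mpr (by simp), PySem.List.sorted_pairwise _ _, ?_⟩
        intro x hx y hy
        have hx0 := List.eq_of_mem_replicate hx
        have hy0 := (digitsOf_bounds m hm y
          ((PySem.List.sorted_perm _ _ _).mem_iff.mp hy)).1
        omega
      have heq := PySem.List.sorted_id_eq_of_perm_of_pairwise _ _ hper hpw
      split
      · rw [hL]; unfold sA; rw [heq]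
      · rename_i hge
        rw [hL] at hge
        have h0 : 4 - (digitsOf m).length = 0 := by omega
        unfold sA
        simp [h0]
    have htakeA : (sA m).take 4 = [a0, a1, a2, a3] := by rw [hA]; simp
    have htakeD : (sD m).take 4 = [d0, d1, d2, d3] := by rw [hD]; simp
    have hflatA : ([a0, a1, a2, a3] : List Int).flatMap PySem.Int.toChars
        = [dChar a0, dChar a1, dChar a2, dChar a3] := by
      simp [toChars_digit a0 ha0.1 ha0.2, toChars_digit a1 ha1.1 ha1.2,
        toChars_digit a2 ha2.1 ha2.2, toChars_digit a3 ha3.1 ha3.2]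
    have hflatD : ([d0, d1, d2, d3] : List Int).flatMap PySem.Int.toChars
        = [dChar d0, dChar d1, dChar d2, dChar d3] := by
      simp [toChars_digit d0 hd0.1 hd0.2, toChars_digit d1 hd1.1 hd1.2,
        toChars_digit d2 hd2.1 hd2.2, toChars_digit d3 hd3.1 hd3.2]
    have hsd : PySem.List.sorted (sA m) (fun x => x) true = sD m := rfl
    simp only [nextK, hds, hpadB, hsd, htakeA, htakeD, hflatA, hflatD, hvA, hvD]
    simp

theorem loop_eq (fuel : Nat) : ∀ (m ctr : Int) (pog : List (List Char)), 0 ≤ m →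
    kepsLoop fuel m (stepAD m).1 (stepAD m).2 ctr pog = ctr + altGo fuel m := by
  induction fuel with
  | zero =>
    intro m ctr pog hm
    rw [kepsLoop, altGo]
    by_cases h1 : m = 6174
    · simp [h1]
    · by_cases h2 : m = 0 <;> simp [h2]
  | succ f ih =>
    intro m ctr pog hm
    rw [kepsLoop, altGo]
    by_cases h1 : m = 6174
    · simp [h1]
    · by_cases h2 : m = 0
      · simp [h2]
      · obtain ⟨aN, dN, e1, e2, hle, hnext⟩ := step_core m hm
        simp only [h1, h2, if_neg, ne_eq, not_false_iff, or_self, ite_true]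
        rw [e1, e2]
        rw [if_neg (by omega : ¬ aN > dN)]
        have hnn : 0 ≤ dN - aN := by omega
        have hx : dN - aN = nextK m := hnext.symm
        rw [hx] at hnn ⊢
        rw [ih (nextK m) (ctr + 1) _ hnn]
        omega

-- ===== VERDICT (by name: the statement is the Claim_ definition above) =====
theorem KepsConstant_spec : Claim_equal_KepsConstant := by
  unfold Claim_equal_KepsConstant
  intro n _ hp
  unfold Spec_KepsConstant KepsConstant KepsConstant_alt
  simpa using loop_eq 64 n 0 [] hp
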